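-- pv_equiv track=rewrite | github.com/bas-deboer/chemopardb | ChemoPar/build/management/commands/build_ifp_v2.py | generate_interaction_fingerprint
-- ===== SOURCE A (Python) =====
-- def generate_interaction_fingerprint(interaction_dict):
--     # 9 possible interactions
--     possible_interactions = [
--         "Hydrophobic", "Pistacking", "HBDonor", "HBAcceptor",
--         "Anionic", "Cationic", "CationPi", "PiCation", "VdWContact"
--     ]
--
--     bitstring_parts = []
--
--     # Loop through generic numbers 30 to 150
--     for generic_number in range(30, 151):
--         interactions = interaction_dict.get(generic_number, set())
--         bitstring = ["0"] * len(possible_interactions)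
--         for interaction in interactions:
--             if interaction in possible_interactions:
--                 index = possible_interactions.index(interaction)
--                 bitstring[index] = "1"
--         bitstring_parts.append("".join(bitstring))
--
--     # Concatenate all bitstrings for each generic number
--     return "".join(bitstring_parts)
-- ===== SOURCE B (Python) =====
-- def generate_interaction_fingerprint(interaction_dict):
--     possible_interactions = [
--         "Hydrophobic", "Pistacking", "HBDonor", "HBAcceptor",
--         "Anionic", "Cationic", "CationPi", "PiCation", "VdWContact"
--     ]
--     return "".join(
--         "".join("1" if p in interaction_dict.get(g, set()) else "0"
--                 for p in possible_interactions)
--         for g in range(30, 151)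
--     )
-- ===== Notes on version B (the rewrite author's own statement) =====
-- stated objective: simpler
-- what changed: Replaces the zero-initialized 9-slot array mutated via possible_interactions.index lookups with a direct nested join that walks possible_interactions in fixed order and emits '1'/'0' by membership test, with no intermediate mutable list.
import Mathlib
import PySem

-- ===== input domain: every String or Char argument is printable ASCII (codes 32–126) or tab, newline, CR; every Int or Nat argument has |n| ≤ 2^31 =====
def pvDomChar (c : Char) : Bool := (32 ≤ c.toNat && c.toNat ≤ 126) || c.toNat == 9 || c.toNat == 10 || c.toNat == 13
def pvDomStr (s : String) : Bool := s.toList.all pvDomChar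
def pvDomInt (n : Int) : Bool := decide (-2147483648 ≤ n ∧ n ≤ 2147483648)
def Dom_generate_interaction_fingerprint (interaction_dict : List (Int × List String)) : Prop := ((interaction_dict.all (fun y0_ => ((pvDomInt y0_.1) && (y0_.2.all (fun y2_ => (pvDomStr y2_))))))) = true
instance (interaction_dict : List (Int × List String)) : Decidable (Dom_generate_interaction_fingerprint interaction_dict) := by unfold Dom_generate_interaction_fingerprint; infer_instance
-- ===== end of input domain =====

-- B replaces A's zero-initialized 9-slot array mutated via index lookups with a direct
-- membership-driven nested join over the fixed interaction list (objective: simpler).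
-- A iterates over each Python set; the result is order-independent (bits are only set),
-- so iterating the set's distinct elements in list order is exact.

-- ===== PORT A =====
-- the fixed list of 9 possible interactions (shared constant of both sources)
def possibleInteractions : List String :=
  ["Hydrophobic", "Pistacking", "HBDonor", "HBAcceptor",
   "Anionic", "Cationic", "CationPi", "PiCation", "VdWContact"]

-- body of A's inner for-loop: flip the bit at possible_interactions.index(interaction)
def giStepA (bits : List String) (x : String) : List String :=
  if x ∈ possibleInteractions then
    PySem.List.pySetD bits (((PySem.List.index? possibleInteractions x).getD 0 : Nat) : Int) "1"
  else bits

def generate_interaction_fingerprint (interaction_dict : List (Int × List String)) : String :=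
  PySem.Str.join ""
    ((PySem.List.pyRange 30 151 1).foldl (fun acc generic_number =>
      acc ++ [PySem.Str.join ""
        (((PySem.Dict.mk interaction_dict).getD generic_number []).foldl giStepA
          (List.replicate possibleInteractions.length "0"))]) [])

-- ===== PORT B =====
def generate_interaction_fingerprint_alt (interaction_dict : List (Int × List String)) : String :=
  PySem.Str.join "" ((PySem.List.pyRange 30 151 1).map (fun g =>
    PySem.Str.join "" (possibleInteractions.map
      (fun p => if p ∈ (PySem.Dict.mk interaction_dict).getD g [] then "1" else "0"))))

-- ===== PRECONDITION & SPEC =====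
def Spec_generate_interaction_fingerprint (interaction_dict : List (Int × List String)) (out : String) : Prop := out = generate_interaction_fingerprint_alt interaction_dict
instance (interaction_dict : List (Int × List String)) (out : String) : Decidable (Spec_generate_interaction_fingerprint interaction_dict out) := by unfold Spec_generate_interaction_fingerprint; infer_instance

-- ===== CLAIM (what is proved, stated in full; the proofs are below) =====
def Claim_equal_generate_interaction_fingerprint : Prop := ∀ (interaction_dict : List (Int × List String)), Dom_generate_interaction_fingerprint interaction_dict → Spec_generate_interaction_fingerprint interaction_dict (generate_interaction_fingerprint interaction_dict)

-- ===== LEMMAS AND PROOFS =====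

-- Invariant of A's inner loop: starting from any image of possibleInteractions under f,
-- folding giStepA over s turns slot p into "1" exactly when p ∈ s.
theorem giStepA_fold (s : List String) (f : String → String) :
    s.foldl giStepA (possibleInteractions.map f)
      = possibleInteractions.map (fun p => if p ∈ s then "1" else f p) := by
  induction s generalizing f with
  | nil => simp
  | cons x s ih =>
    by_cases hx : x ∈ possibleInteractions
    · have hstep : giStepA (possibleInteractions.map f) x
          = possibleInteractions.map (fun p => if p = x then "1" else f p) := by
        fin_cases hx <;>
          simp [giStepA, possibleInteractions, PySem.List.index?,
                PySem.List.pySetD, PySem.List.pySet?, PySem.List.pyIdx?,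
                List.idxOf?, List.findIdx?, List.findIdx?.go]
      rw [List.foldl_cons, hstep, ih]
      refine List.map_congr_left fun p _ => ?_
      by_cases hpx : p = x <;> by_cases hps : p ∈ s <;> simp [hpx, hps]
    · have hstep : giStepA (possibleInteractions.map f) x = possibleInteractions.map f := by
        simp [giStepA, hx]
      rw [List.foldl_cons, hstep, ih]
      refine List.map_congr_left fun p hp => ?_
      have : p ≠ x := fun h => hx (h ▸ hp)
      simp [this]

theorem giPart_eq (s : List String) :
    PySem.Str.join "" (s.foldl giStepA (List.replicate possibleInteractions.length "0"))
      = PySem.Str.join "" (possibleInteractions.map (fun p => if p ∈ s then "1" else "0")) := by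
  have h0 : List.replicate possibleInteractions.length "0"
      = possibleInteractions.map (fun _ => "0") := by
    simp [List.map_const']
  rw [h0, giStepA_fold]

-- ===== VERDICT (by name: the statement is the Claim_ definition above) =====
theorem generate_interaction_fingerprint_spec : Claim_equal_generate_interaction_fingerprint := by
  intro d _
  show generate_interaction_fingerprint d = generate_interaction_fingerprint_alt d
  unfold generate_interaction_fingerprint generate_interaction_fingerprint_alt
  rw [PySem.List.foldl_append_singleton_eq_map]
  congr 1
  refine List.map_congr_left fun g _ => ?_
  exact giPart_eq _
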